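-- pv_equiv track=rewrite | github.com/EnricoMagnago/AnomalyDetection | sax_implementation/SAX.py | get_string_representation
-- ===== SOURCE A (Python) =====
-- def get_string_representation(dict_data, load_size, window_size):
--
-- 	string = ""
--
-- 	num_subsq = load_size - window_size
-- 	for i in range (num_subsq):
-- 		for key, values in dict_data.items():
-- 			if i in values:
-- 				string = string + key
-- 				break
--
-- 	return string
-- ===== SOURCE B (Python) =====
-- def get_string_representation(dict_data, load_size, window_size):
--     # Precompute: position -> first key (in dict order) whose values contain it.
--     first = {}
--     for key, values in dict_data.items():
--         for v in values:
--             if v not in first: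
--                 first[v] = key
--     return "".join(first[i] for i in range(load_size - window_size) if i in first)
-- ===== Notes on version B (the rewrite author's own statement) =====
-- stated objective: alternative
-- what changed: B builds a position-to-first-key map in one pass over all value lists and then emits the string in a single pass over the index range with dict lookups, instead of A's rescan of every key's value list (with early break) for every index.
import Mathlib
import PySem

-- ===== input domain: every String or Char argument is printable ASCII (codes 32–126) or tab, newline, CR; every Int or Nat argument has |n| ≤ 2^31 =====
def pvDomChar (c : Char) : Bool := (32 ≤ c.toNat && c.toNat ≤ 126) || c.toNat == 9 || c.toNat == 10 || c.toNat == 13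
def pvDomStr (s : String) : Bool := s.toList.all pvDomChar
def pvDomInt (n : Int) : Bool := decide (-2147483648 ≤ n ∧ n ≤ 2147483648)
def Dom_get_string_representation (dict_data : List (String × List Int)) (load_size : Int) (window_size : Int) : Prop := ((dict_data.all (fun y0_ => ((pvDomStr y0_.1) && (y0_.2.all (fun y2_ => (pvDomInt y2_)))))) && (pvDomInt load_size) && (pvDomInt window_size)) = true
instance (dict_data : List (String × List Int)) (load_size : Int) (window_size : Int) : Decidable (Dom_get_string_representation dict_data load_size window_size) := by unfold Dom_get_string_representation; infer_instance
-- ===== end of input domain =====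

-- B replaces A's per-index rescan of every key's value list by a precomputed
-- position→first-key map and one pass over the index range (objective: alternative).

-- ===== PORT A =====
-- inner 'for key, values … if i in values: string += key; break' loop of A
def pvScanA (i : Int) (s : String) : List (String × List Int) → String
  | [] => s
  | (k, vs) :: rest => if i ∈ vs then s ++ k else pvScanA i s rest

def get_string_representation (dict_data : List (String × List Int)) (load_size : Int) (window_size : Int) : String :=
  (PySem.List.pyRange 0 (load_size - window_size) 1).foldl
    (fun s i => pvScanA i s dict_data) ""

-- ===== PORT B =====
-- 'first' dict of Source B: position -> first key whose values contain it
def pvBuildFirst (dict_data : List (String × List Int)) : PySem.Dict Int String :=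
  dict_data.foldl
    (fun d kv => kv.2.foldl (fun d v => if d.contains v then d else d.insert v kv.1) d)
    PySem.Dict.empty

def get_string_representation_alt (dict_data : List (String × List Int)) (load_size : Int) (window_size : Int) : String :=
  PySem.Str.join ""
    ((PySem.List.pyRange 0 (load_size - window_size) 1).filterMap
      (fun i => (pvBuildFirst dict_data).get? i))

-- ===== PRECONDITION & SPEC =====
def Spec_get_string_representation (dict_data : List (String × List Int)) (load_size : Int) (window_size : Int) (out : String) : Prop := out = get_string_representation_alt dict_data load_size window_size
instance (dict_data : List (String × List Int)) (load_size : Int) (window_size : Int) (out : String) : Decidable (Spec_get_string_representation dict_data load_size window_size out) := by unfold Spec_get_string_representation; infer_instance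

-- ===== CLAIM (what is proved, stated in full; the proofs are below) =====
def Claim_equal_get_string_representation : Prop := ∀ (dict_data : List (String × List Int)) (load_size : Int) (window_size : Int), Dom_get_string_representation dict_data load_size window_size → Spec_get_string_representation dict_data load_size window_size (get_string_representation dict_data load_size window_size)

-- ===== LEMMAS AND PROOFS =====

-- first key (in dict order) whose value list contains i
def pvFirst (l : List (String × List Int)) (i : Int) : Option String :=
  (l.find? (fun kv => decide (i ∈ kv.2))).map (·.1)

theorem pvBuild_inner (vs : List Int) (k : String) (d : PySem.Dict Int String) (i : Int) :
    (vs.foldl (fun d v => if d.contains v then d else d.insert v k) d).get? i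
      = (d.get? i).or (if i ∈ vs then some k else none) := by
  induction vs generalizing d with
  | nil => simp
  | cons v rest ih =>
    simp only [List.foldl_cons, ih]
    by_cases hiv : i = v
    · subst hiv
      by_cases hc : d.contains i = true
      · have hs : (d.get? i).isSome := by
          rw [← PySem.Dict.contains_eq_isSome_get?]; exact hc
        obtain ⟨w, hw⟩ := Option.isSome_iff_exists.mp hs
        simp [hc, hw]
      · have hb : d.contains i = false := by simpa using hc
        have hn : d.get? i = none := by
          have h := PySem.Dict.contains_eq_isSome_get? (d := d) (k := i)
          rw [hb] at h
          exact Option.not_isSome_iff_eq_none.mp (by simp [← h])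
        simp [hb, hn, PySem.Dict.get?_insert_self]
    · have hget : (if d.contains v then d else d.insert v k).get? i = d.get? i := by
        split
        · rfl
        · rw [PySem.Dict.get?_insert]; simp [hiv]
      simp [hget, hiv]

theorem pvBuild_get? (l : List (String × List Int)) (d : PySem.Dict Int String) (i : Int) :
    (l.foldl (fun d kv => kv.2.foldl (fun d v => if d.contains v then d else d.insert v kv.1) d) d).get? i
      = (d.get? i).or (pvFirst l i) := by
  induction l generalizing d with
  | nil => simp [pvFirst]
  | cons kv rest ih =>
    simp only [List.foldl_cons, ih, pvBuild_inner]
    rw [Option.or_assoc]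
    congr 1
    simp only [pvFirst, List.find?_cons]
    by_cases h : i ∈ kv.2 <;> simp [h]

theorem pvScanA_eq (i : Int) (s : String) (l : List (String × List Int)) :
    pvScanA i s l = s ++ (pvFirst l i).getD "" := by
  induction l generalizing s with
  | nil => simp [pvScanA, pvFirst]
  | cons kv rest ih =>
    obtain ⟨k, vs⟩ := kv
    simp only [pvScanA, pvFirst, List.find?_cons]
    by_cases h : i ∈ vs
    · simp [h]
    · simp only [h, ih, pvFirst]
      simp

theorem foldl_append_getD (g : Int → Option String) (L : List Int) (s : String) :
    L.foldl (fun s i => s ++ (g i).getD "") s = s ++ PySem.Str.join "" (L.filterMap g) := by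
  induction L generalizing s with
  | nil => simp [PySem.Str.join]
  | cons i L' ih =>
    simp only [List.foldl_cons, ih, List.filterMap_cons]
    cases hg : g i with
    | none => simp
    | some a =>
      cases hrest : L'.filterMap g with
      | nil => simp [PySem.Str.join]
      | cons b bs =>
        simp [PySem.Str.join, PySem.Chars.join_cons_cons, String.ofList_append]
        rw [String.append_assoc]

-- ===== VERDICT (by name: the statement is the Claim_ definition above) =====
theorem get_string_representation_spec : Claim_equal_get_string_representation := by
  intro dict_data load_size window_size _
  unfold Spec_get_string_representation get_string_representation get_string_representation_alt
  have h1 : (fun (s : String) (i : Int) => pvScanA i s dict_data)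
      = fun s i => s ++ ((pvFirst dict_data i).getD "") := by
    funext s i; exact pvScanA_eq i s dict_data
  have h2 : (fun i => (pvBuildFirst dict_data).get? i) = fun i => pvFirst dict_data i := by
    funext i
    simp [pvBuildFirst, pvBuild_get?]
  rw [h1, h2, foldl_append_getD]
  simp
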